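-- pv_equiv track=rewrite | github.com/a-anand-91119/hydra | hydra/preflight.py | missing_scopes
-- ===== SOURCE A (Python) =====
-- from typing import Dict, List, Literal, Optional, Tuple
--
-- GITHUB_ORG_SCOPES = {"admin:org", "write:org"}
--
-- def missing_scopes(required: set, have: List[str]) -> set:
--     """Compute missing scopes, treating GitHub org permissions as substitutable."""
--     have_set = set(have)
--     missing: set = set()
--     for req in required:
--         if req == "_org":
--             if not (have_set & GITHUB_ORG_SCOPES):
--                 missing.add(f"admin:org (or {'/'.join(sorted(GITHUB_ORG_SCOPES))})")
--         elif req not in have_set: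
--             missing.add(req)
--     return missing
-- ===== SOURCE B (Python) =====
-- GITHUB_ORG_SCOPES = {"admin:org", "write:org"}
--
-- def missing_scopes(required, have):
--     """Compute missing scopes, treating GitHub org permissions as substitutable."""
--     placeholder = "admin:org (or %s)" % "/".join(sorted(GITHUB_ORG_SCOPES))
--     # start from the full (placeholder-substituted) requirement set ...
--     missing = {placeholder if r == "_org" else r for r in required}
--     # ... and delete what each held scope satisfies
--     for h in have:
--         missing.discard(h)
--         if h in GITHUB_ORG_SCOPES:
--             missing.discard(placeholder)
--     return missing
-- ===== Notes on version B (the rewrite author's own statement) =====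
-- stated objective: alternative
-- what changed: Inverts the traversal: instead of A's grow-from-empty loop over required testing membership in have, B first materialises the full placeholder-substituted requirement set and then runs a deletion pass over have, discarding each held scope (and the placeholder whenever an org scope is held).
import Mathlib
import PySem

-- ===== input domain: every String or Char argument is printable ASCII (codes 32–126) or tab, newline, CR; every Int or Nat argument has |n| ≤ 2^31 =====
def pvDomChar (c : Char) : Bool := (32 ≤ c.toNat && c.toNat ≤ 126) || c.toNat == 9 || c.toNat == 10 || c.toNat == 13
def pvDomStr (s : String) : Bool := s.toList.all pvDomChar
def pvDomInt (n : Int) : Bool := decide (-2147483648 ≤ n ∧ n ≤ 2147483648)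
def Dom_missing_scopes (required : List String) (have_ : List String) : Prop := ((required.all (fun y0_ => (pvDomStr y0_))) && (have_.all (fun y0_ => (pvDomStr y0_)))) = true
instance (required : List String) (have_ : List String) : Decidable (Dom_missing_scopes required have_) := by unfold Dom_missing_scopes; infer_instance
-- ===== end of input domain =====

-- B inverts A's traversal: it builds the full placeholder-substituted requirement set first and then runs a deletion
-- pass over have_, instead of A's grow-from-empty loop over required; objective: alternative. Proved equal under Pre_.


-- ===== PORT A =====
def GITHUB_ORG_SCOPES : PySem.Set String := PySem.Set.ofList ["admin:org", "write:org"]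

def missing_scopes (required : List String) (have_ : List String) : List String :=
  let have_set : PySem.Set String := PySem.Set.ofList have_
  required.foldl (fun missing req =>
    if req == "_org" then
      if (PySem.Set.inter have_set GITHUB_ORG_SCOPES).isEmpty then
        PySem.Set.add missing
          ("admin:org (or " ++ PySem.Str.join "/" (PySem.List.sorted GITHUB_ORG_SCOPES (fun x => x) false) ++ ")")
      else missing
    else
      if !PySem.Set.contains have_set req then PySem.Set.add missing req else missing)
    PySem.Set.empty

-- ===== PORT B =====
def missing_scopes_alt (required : List String) (have_ : List String) : List String :=
  let placeholder : String :=
    "admin:org (or " ++ PySem.Str.join "/" (PySem.List.sorted GITHUB_ORG_SCOPES (fun x => x) false) ++ ")"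
  let init : PySem.Set String :=
    PySem.Set.ofList (required.map (fun r => if r == "_org" then placeholder else r))
  have_.foldl (fun missing h =>
    let m1 := PySem.Set.discard missing h
    if PySem.Set.contains GITHUB_ORG_SCOPES h then PySem.Set.discard m1 placeholder else m1) init

-- ===== PRECONDITION & SPEC =====
-- Pre_ excludes inputs in which the pre-formatted placeholder message string itself already occurs as a scope in
-- required or have_: there A treats it as an ordinary scope while B's deletion pass identifies it with the
-- substituted '_org' message, and neither reading is specified for an input colliding with A's generated message.
def Pre_missing_scopes (required : List String) (have_ : List String) : Prop :=
  "admin:org (or admin:org/write:org)" ∉ required ∧ "admin:org (or admin:org/write:org)" ∉ have_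
instance (required : List String) (have_ : List String) : Decidable (Pre_missing_scopes required have_) := by
  unfold Pre_missing_scopes; infer_instance

def pvWitness_missing_scopes : List String × List String := (["repo", "_org"], ["repo"])

def Spec_missing_scopes (required : List String) (have_ : List String) (out : List String) : Prop := out = missing_scopes_alt required have_
instance (required : List String) (have_ : List String) (out : List String) : Decidable (Spec_missing_scopes required have_ out) := by unfold Spec_missing_scopes; infer_instance

-- ===== CLAIM (what is proved, stated in full; the proofs are below) =====
def Claim_equal_missing_scopes : Prop := ∀ (required : List String) (have_ : List String), Dom_missing_scopes required have_ → Pre_missing_scopes required have_ → Spec_missing_scopes required have_ (missing_scopes required have_)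

-- ===== LEMMAS AND PROOFS =====

-- the message both ports format from GITHUB_ORG_SCOPES, as a literal
set_option maxRecDepth 1000000 in
theorem pv_ph_eq :
    ("admin:org (or " ++ PySem.Str.join "/" (PySem.List.sorted GITHUB_ORG_SCOPES (fun x => x) false) ++ ")")
      = "admin:org (or admin:org/write:org)" := by
  have h0 : GITHUB_ORG_SCOPES = ["admin:org", "write:org"] := by decide
  have h1 : PySem.List.sorted (["admin:org", "write:org"] : List String) (fun x => x) false
      = ["admin:org", "write:org"] := by
    simp [PySem.List.sorted, PySem.List.insertBy]
    decide
  rw [h0, h1, ← String.toList_inj]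
  simp only [String.toList_append, PySem.Str.toList_join]
  decide

-- filter commutes with set(·) (first-occurrence dedup)
theorem pv_filter_ofList {α : Type} [BEq α] [LawfulBEq α] (p : α → Bool) (l : List α) :
    List.filter p (PySem.Set.ofList l) = PySem.Set.ofList (List.filter p l) := by
  induction l using List.reverseRecOn with
  | nil => rfl
  | append_singleton l x ih =>
    rw [PySem.Set.ofList_append_singleton, List.filter_append, PySem.Set.add_eq_ite]
    by_cases hx : x ∈ PySem.Set.ofList l
    · have hxl : x ∈ l := (PySem.Set.mem_ofList _ _).mp hx
      by_cases hp : p x = true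
      · have hxf : x ∈ List.filter p l := List.mem_filter.mpr ⟨hxl, hp⟩
        simp [hx, hp, PySem.Set.ofList_append_singleton, (PySem.Set.mem_ofList _ _).mpr hxf, ih]
      · simp [hx, hp, ih]
    · have hxl : x ∉ l := fun h => hx ((PySem.Set.mem_ofList _ _).mpr h)
      by_cases hp : p x = true
      · have hxf : x ∉ PySem.Set.ofList (List.filter p l) := by
          intro h
          exact hxl (List.mem_of_mem_filter ((PySem.Set.mem_ofList _ _).mp h))
        simp [hx, hp, PySem.Set.ofList_append_singleton, hxf, ih, List.filter_append]
      · simp [hx, hp, ih]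

-- B's deletion pass over have_ is one filter of its start set
theorem pv_foldl_discard (ph : String) (have_ : List String) (s : List String) :
    have_.foldl (fun missing h =>
      let m1 := PySem.Set.discard missing h
      if PySem.Set.contains GITHUB_ORG_SCOPES h then PySem.Set.discard m1 ph else m1) s
    = s.filter (fun x =>
        !(have_.contains x) &&
        !((x == ph) && have_.any (fun h => PySem.Set.contains GITHUB_ORG_SCOPES h))) := by
  induction have_ generalizing s with
  | nil => simp
  | cons h t ih =>
    simp only [List.foldl_cons]
    rw [ih]
    by_cases hc : PySem.Set.contains GITHUB_ORG_SCOPES h = true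
    · have hc' : h ∈ GITHUB_ORG_SCOPES := (PySem.Set.contains_iff _ _).mp hc
      simp only [hc, if_true, PySem.Set.discard, List.filter_filter]
      apply List.filter_congr
      intro x _
      by_cases hxh : x = h
      · subst hxh
        simp [hc', List.contains_cons, List.any_cons,
          Bool.and_assoc, Bool.and_comm, Bool.and_left_comm]
      · by_cases hxp : x = ph
        · subst hxp
          simp [hc', hxh, List.contains_cons, List.any_cons,
            Bool.and_assoc, Bool.and_comm, Bool.and_left_comm]
        · have hbp : (x == ph) = false := beq_eq_false_iff_ne.mpr hxp
          have hbh : (x == h) = false := beq_eq_false_iff_ne.mpr hxh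
          simp [hc', hbp, hbh, List.contains_cons, List.any_cons,
            Bool.and_assoc, Bool.and_comm, Bool.and_left_comm]
          exact fun _ => hxh
    · rw [Bool.not_eq_true] at hc
      have hc' : h ∉ GITHUB_ORG_SCOPES := fun hm => by
        rw [(PySem.Set.contains_iff _ _).mpr hm] at hc
        exact Bool.noConfusion hc
      simp only [hc, Bool.false_eq_true, if_false, PySem.Set.discard, List.filter_filter]
      apply List.filter_congr
      intro x _
      by_cases hxh : x = h
      · subst hxh
        simp [hc', List.contains_cons, List.any_cons,
          Bool.and_assoc, Bool.and_comm, Bool.and_left_comm]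
      · by_cases hxp : x = ph
        · subst hxp
          simp [hc', hxh, List.contains_cons, List.any_cons,
            Bool.and_assoc, Bool.and_comm, Bool.and_left_comm]
        · have hbp : (x == ph) = false := beq_eq_false_iff_ne.mpr hxp
          have hbh : (x == h) = false := beq_eq_false_iff_ne.mpr hxh
          simp [hc', hbp, hbh, List.contains_cons, List.any_cons,
            Bool.and_assoc, Bool.and_comm, Bool.and_left_comm]
          exact fun _ => hxh

theorem pv_main (required have_ : List String)
    (h1 : "admin:org (or admin:org/write:org)" ∉ required)
    (h2 : "admin:org (or admin:org/write:org)" ∉ have_) :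
    missing_scopes required have_ = missing_scopes_alt required have_ := by
  simp only [missing_scopes, missing_scopes_alt, pv_ph_eq]
  rw [pv_foldl_discard]
  set hs : PySem.Set String := PySem.Set.ofList have_ with hhs
  set c : Bool := (PySem.Set.inter hs GITHUB_ORG_SCOPES).isEmpty with hc
  set ph : String := "admin:org (or admin:org/write:org)" with hph
  set subst : String → String := (fun r => if r == "_org" then ph else r) with hsubst
  set condA : String → Bool := (fun r => if r == "_org" then c else !PySem.Set.contains hs r) with hcondA
  set d : Bool := have_.any (fun h => PySem.Set.contains GITHUB_ORG_SCOPES h) with hd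
  -- c decides emptiness of hs ∩ ORG; d decides whether some held scope is an org scope: c = !d
  have hcd : c = !d := by
    rw [hc, hd]
    cases hdb : have_.any (fun h => PySem.Set.contains GITHUB_ORG_SCOPES h) with
    | true =>
      simp only [Bool.not_true]
      obtain ⟨x, hxm, hx⟩ := List.any_eq_true.mp hdb
      rcases h' : PySem.Set.inter (PySem.Set.ofList have_) GITHUB_ORG_SCOPES with _ | ⟨y, ys⟩
      · exfalso
        have hmem : x ∈ PySem.Set.inter (PySem.Set.ofList have_) GITHUB_ORG_SCOPES :=
          (PySem.Set.mem_inter _ _ _).mpr ⟨(PySem.Set.mem_ofList _ _).mpr hxm,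
            (PySem.Set.contains_iff _ _).mp hx⟩
        rw [h'] at hmem
        exact (List.not_mem_nil) hmem
      · simp [h']
    | false =>
      simp only [Bool.not_false, List.isEmpty_iff, List.eq_nil_iff_forall_not_mem]
      intro x hx
      obtain ⟨hxh, hxo⟩ := (PySem.Set.mem_inter _ _ _).mp hx
      have hany : have_.any (fun h => PySem.Set.contains GITHUB_ORG_SCOPES h) = true :=
        List.any_eq_true.mpr ⟨x, (PySem.Set.mem_ofList _ _).mp hxh,
          (PySem.Set.contains_iff _ _).mpr hxo⟩
      rw [hdb] at hany
      exact Bool.false_ne_true hany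
  -- A's loop as a dedup of the condA-filtered, substituted required list
  have hstepA :
      required.foldl (fun missing req =>
        if req == "_org" then
          if c then PySem.Set.add missing ph else missing
        else
          if !PySem.Set.contains hs req then PySem.Set.add missing req else missing)
        PySem.Set.empty
      = PySem.Set.ofList ((required.filter condA).map subst) := by
    have h := PySem.List.foldl_congr_mem (l := required) (init := (PySem.Set.empty : PySem.Set String))
      (f := fun missing req =>
        if req == "_org" then
          if c then PySem.Set.add missing ph else missing
        else
          if !PySem.Set.contains hs req then PySem.Set.add missing req else missing)
      (g := fun acc r => if condA r then PySem.Set.add acc (subst r) else acc)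
      (by
        intro acc r _
        by_cases hr : r = "_org"
        · subst hr; simp [hcondA, hsubst]
        · simp [hcondA, hsubst, hr])
    rw [h, PySem.List.foldl_if_eq_foldl_filter condA (fun acc x => PySem.Set.add acc (subst x)),
        ← PySem.Set.update_map_eq_foldl_add, PySem.Set.update_empty]
  rw [hstepA, pv_filter_ofList, List.filter_map]
  congr 1
  have hfc : List.filter ((fun x => !(have_.contains x) && !((x == ph) && d)) ∘ subst) required
      = List.filter condA required := by
    apply List.filter_congr
    intro r hr
    have hrph : r ≠ ph := fun h => h1 (h ▸ hr)
    have hhave : have_.contains r = PySem.Set.contains hs r := by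
      simp [hhs, List.contains_iff_mem, PySem.Set.mem_ofList]
    by_cases horg : r = "_org"
    · subst horg
      have hphhave : have_.contains ph = false := by
        simp [List.contains_iff_mem]; exact h2
      simp [hsubst, hcondA, hcd, hphhave]
      exact fun _ => h2
    · have hrph' : (r == ph) = false := by simp [hrph]
      simp [hsubst, hcondA, horg, hrph', hhave]
      exact Iff.symm (PySem.Set.mem_ofList _ _)
  rw [hfc]

-- ===== VERDICT (by name: the statement is the Claim_ definition above) =====
theorem missing_scopes_spec : Claim_equal_missing_scopes := by
  intro required have_ _ hpre
  unfold Spec_missing_scopes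
  exact pv_main required have_ hpre.1 hpre.2
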